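-- pv_equiv track=rewrite | github.com/BC4534/LearningWarehouse | learningmodule/learning_python/question4/ai4.py | count_flight_city_num
-- ===== SOURCE A (Python) =====
-- def count_flight_city_num(csv_list):
--     """
--     统计每个出发城市的航班数量
--     :param csv_list: 包含航班信息的列表
--     :return: 包含每个出发城市航班数量的字典
--     """
--     city_num = {}
--     for row in csv_list[1:]:
--         departure_city = row[1]
--         if departure_city not in city_num:
--             city_num[departure_city] = 1
--         else:
--             city_num[departure_city] += 1
--     return city_num
-- ===== SOURCE B (Python) =====
-- def count_flight_city_num(csv_list):
--     """Repeated-partition worklist: while cities remain, take the first one,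
--     split off all its occurrences (their number is its count), and continue
--     on the shrunken remainder; keys appear in first-occurrence order."""
--     cities = [row[1] for row in csv_list[1:]]
--     pairs = []
--     while cities:
--         head = cities[0]
--         rest = [c for c in cities[1:] if c != head]
--         pairs.append((head, len(cities) - len(rest)))
--         cities = rest
--     return dict(pairs)
-- ===== Notes on version B (the rewrite author's own statement) =====
-- stated objective: alternative
-- what changed: Replaces A's single hash-insertion pass (membership test + in-place increment per row) with a repeated-partition worklist: extract the departure-city column, then repeatedly take the first remaining city, filter out all its occurrences (the size drop is its count), and loop on the shrunken remainder; no per-row dict lookup occurs.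
-- outside the precondition, e.g. on count_flight_city_num([['h', 'h'], ['x']]): A raises IndexError, B raises IndexError
import Mathlib
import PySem

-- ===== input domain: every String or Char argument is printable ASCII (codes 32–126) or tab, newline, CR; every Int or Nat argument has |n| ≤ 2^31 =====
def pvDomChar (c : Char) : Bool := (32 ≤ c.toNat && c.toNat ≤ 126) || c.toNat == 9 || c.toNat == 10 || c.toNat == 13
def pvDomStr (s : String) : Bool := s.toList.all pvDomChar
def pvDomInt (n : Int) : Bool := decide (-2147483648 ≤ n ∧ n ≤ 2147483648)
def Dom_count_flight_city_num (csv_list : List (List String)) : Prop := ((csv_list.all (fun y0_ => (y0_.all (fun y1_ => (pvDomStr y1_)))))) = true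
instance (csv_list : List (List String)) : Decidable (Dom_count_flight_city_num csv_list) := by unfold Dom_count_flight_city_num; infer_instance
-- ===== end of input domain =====

-- B replaces A's single hash-insertion pass with a repeated-partition worklist over the
-- departure-city column (take the first remaining city, filter out its occurrences, loop);
-- same result, no speed claim.

-- ===== PORT A =====
def count_flight_city_num (csv_list : List (List String)) : List (String × Int) :=
  ((PySem.List.slice csv_list (some 1) none).foldl
    (fun city_num row =>
      let departure_city := PySem.List.pyGetD row 1 ""   -- row[1]; Pre_ keeps it in range
      if city_num.contains departure_city = false then
        city_num.insert departure_city 1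
      else
        city_num.insert departure_city (city_num.getD departure_city 0 + 1))
    PySem.Dict.empty).items

-- ===== PORT B =====
-- the 'while cities:' worklist of Source B, as the obvious structural recursion on the worklist
def pvGroupGo : List (String × Int) → List String → List (String × Int)
  | pairs, [] => pairs
  | pairs, head :: tl =>
    let rest := tl.filter (fun c => c != head)
    pvGroupGo (pairs ++ [(head, ((head :: tl).length : Int) - (rest.length : Int))]) rest
termination_by _ cities => cities.length
decreasing_by
  simp only [List.length_cons, List.length_unattach]
  exact Nat.lt_succ_of_le (le_trans (List.length_filter_le _ _) (by simp))

def count_flight_city_num_alt (csv_list : List (List String)) : List (String × Int) :=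
  let cities := (PySem.List.slice csv_list (some 1) none).map
    (fun row => PySem.List.pyGetD row 1 "")              -- row[1]; Pre_ keeps it in range
  -- dict(pairs): the produced pairs have pairwise-distinct keys, so the dict IS this assoc list
  pvGroupGo [] cities

-- ===== PRECONDITION & SPEC =====
-- Pre_ excludes exactly the inputs where A raises IndexError: a row past the header with fewer than 2 fields.
def Pre_count_flight_city_num (csv_list : List (List String)) : Prop :=
  ∀ row ∈ csv_list.drop 1, 2 ≤ row.length
instance (csv_list : List (List String)) : Decidable (Pre_count_flight_city_num csv_list) := by
  unfold Pre_count_flight_city_num; infer_instance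

def pvWitness_count_flight_city_num : List (List String) :=
  [["from", "to"], ["SH", "BJ"], ["CD", "BJ"], ["SH", "SZ"]]

def Spec_count_flight_city_num (csv_list : List (List String)) (out : List (String × Int)) : Prop := out = count_flight_city_num_alt csv_list
instance (csv_list : List (List String)) (out : List (String × Int)) : Decidable (Spec_count_flight_city_num csv_list out) := by unfold Spec_count_flight_city_num; infer_instance

-- ===== CLAIM (what is proved, stated in full; the proofs are below) =====
def Claim_equal_count_flight_city_num : Prop := ∀ (csv_list : List (List String)), Dom_count_flight_city_num csv_list → Pre_count_flight_city_num csv_list → Spec_count_flight_city_num csv_list (count_flight_city_num csv_list)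

-- ===== LEMMAS AND PROOFS =====

-- A's branch on membership is, in both arms, exactly the counter step d.modify c 0 (·+1).
theorem pvStepA_eq (d : PySem.Dict String Int) (c : String) :
    (if d.contains c = false then d.insert c 1 else d.insert c (d.getD c 0 + 1))
      = d.modify c 0 (· + 1) := by
  by_cases h : d.contains c
  · simp [h, PySem.Dict.modify]
  · simp only [Bool.not_eq_true] at h
    simp [h, PySem.Dict.modify, PySem.Dict.getD_of_not_contains (h := h)]

-- the dedup fold ignores later occurrences of an element already collected
theorem pvFoldlAdd_filter (x : String) :
    ∀ (xs : List String) (acc : PySem.Set String), x ∈ acc →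
      xs.foldl PySem.Set.add acc = (xs.filter (fun y => y != x)).foldl PySem.Set.add acc := by
  intro xs
  induction xs with
  | nil => intro acc _; rfl
  | cons y ys ih =>
    intro acc hacc
    by_cases hyx : y = x
    · subst hyx
      have hadd : PySem.Set.add acc y = acc := by
        simp [PySem.Set.add, PySem.Set.contains, hacc]
      simp [hadd, ih acc hacc]
    · have hb : (y != x) = true := by simp [bne, hyx]
      have hc : x ∈ PySem.Set.add acc y := by
        simp only [PySem.Set.add, PySem.Set.contains]
        split <;> simp [hacc]
      simp [hb, List.foldl_cons, ih _ hc]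

-- an element absent from the rest of the input stays at the FRONT of the dedup accumulator
theorem pvFoldlAdd_cons_pull (x : String) :
    ∀ (ys : List String) (s : List String), (∀ y ∈ ys, (y == x) = false) →
      ys.foldl PySem.Set.add (x :: s) = x :: ys.foldl PySem.Set.add s := by
  intro ys
  induction ys with
  | nil => intro s _; rfl
  | cons y ts ih =>
    intro s hall
    have hyx : (y == x) = false := hall y (by simp)
    have hrest : ∀ y' ∈ ts, (y' == x) = false := fun y' h => hall y' (by simp [h])
    have hyx' : y ≠ x := by simpa using hyx
    by_cases h : y ∈ s
    · have h1 : PySem.Set.add (x :: s) y = (x :: s) := by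
        simp [PySem.Set.add, PySem.Set.contains, h]
      have h2 : PySem.Set.add s y = s := by simp [PySem.Set.add, PySem.Set.contains, h]
      simp [List.foldl_cons, h1, h2, ih s hrest]
    · have h1 : PySem.Set.add (x :: s) y = x :: (s ++ [y]) := by
        simp [PySem.Set.add, PySem.Set.contains, h, hyx']
      have h2 : PySem.Set.add s y = s ++ [y] := by simp [PySem.Set.add, PySem.Set.contains, h]
      simp [List.foldl_cons, h1, h2, ih _ hrest]

-- dedup of a cons: the head, then dedup of the tail with the head's occurrences removed
theorem pvOfList_cons_filter (x : String) (xs : List String) :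
    PySem.Set.ofList (x :: xs) = x :: PySem.Set.ofList (xs.filter (fun y => y != x)) := by
  have h1 : PySem.Set.ofList (x :: xs) = xs.foldl PySem.Set.add [x] := by
    simp [PySem.Set.ofList, List.foldl_cons]
  have h2 := pvFoldlAdd_filter x xs [x] (by simp)
  have hall : ∀ y ∈ xs.filter (fun y => y != x), (y == x) = false := by
    intro y hy
    have := List.of_mem_filter hy
    simpa [bne] using this
  have h3 := pvFoldlAdd_cons_pull x (xs.filter (fun y => y != x)) [] hall
  rw [h1, h2, h3]
  rfl

-- the cons-step equation of the worklist loop, with the let inlined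
theorem pvGroupGo_cons (pairs : List (String × Int)) (head : String) (tl : List String) :
    pvGroupGo pairs (head :: tl)
      = pvGroupGo (pairs ++ [(head, ((head :: tl).length : Int) - ((tl.filter (fun c => c != head)).length : Int))])
          (tl.filter (fun c => c != head)) := by
  simp only [pvGroupGo]

-- the worklist loop produces exactly (first-occurrence key, total count) pairs
theorem pvGroupGo_eq :
    ∀ (n : ℕ) (xs : List String) (pairs : List (String × Int)), xs.length ≤ n →
      pvGroupGo pairs xs
        = pairs ++ (PySem.Set.ofList xs).map (fun k => (k, (List.count k xs : Int))) := by
  intro n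
  induction n with
  | zero =>
    intro xs pairs h
    have : xs = [] := List.eq_nil_of_length_eq_zero (Nat.le_zero.mp h)
    subst this
    simp [pvGroupGo, PySem.Set.ofList]
  | succ n ih =>
    intro xs pairs h
    match xs with
    | [] => simp [pvGroupGo, PySem.Set.ofList]
    | x :: t =>
      have hlen : (t.filter (fun c => c != x)).length ≤ n := by
        have := List.length_filter_le (fun c => c != x) t
        have ht : t.length ≤ n := by simpa using Nat.lt_succ_iff.mp (Nat.lt_of_lt_of_le (by simp) h)
        omega
      rw [pvGroupGo_cons, ih _ _ hlen, pvOfList_cons_filter]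
      rw [List.map_cons, List.append_assoc]
      congr 1
      simp only [List.singleton_append, List.cons.injEq]
      constructor
      · -- the head's count: the size drop of the filter
        have hsplit : (t.filter (fun c => c != x)).length + List.count x t = t.length := by
          have h1 : List.count x t = t.countP (fun c => c == x) := by
            simp [List.count]
          have h2 : (t.filter (fun c => c != x)).length = t.countP (fun c => c != x) := by
            simp [List.countP_eq_length_filter]
          have h3 := List.length_eq_countP_add_countP (l := t) (p := fun c => c == x)
          have h4 : t.countP (fun c => ¬ (c == x) = true) = t.countP (fun c => c != x) := by
            apply List.countP_congr
            intro c _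
            simp [bne]
          rw [h1, h2]
          omega
        have : List.count x (x :: t) = List.count x t + 1 := by
          simp [List.count_cons_self]
        rw [this]
        simp only [List.length_cons, Prod.mk.injEq, true_and]
        push_cast
        omega
      · -- remaining keys: their count is unchanged by removing the head's occurrences
        apply List.map_congr_left
        intro k hk
        have hk' : k ∈ t.filter (fun c => c != x) := by
          have := (PySem.Set.mem_ofList _ k).mp hk
          exact this
        have hkx : (k == x) = false := by
          have := List.of_mem_filter hk'
          simpa [bne] using this
        have hne : k ≠ x := by simpa using hkx
        have hc1 : List.count k (x :: t) = List.count k t := by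
          rw [List.count_cons]
          simp [Ne.symm hne]
        have hc2 : List.count k (t.filter (fun c => c != x)) = List.count k t := by
          apply List.count_filter
          simp [bne, hne]
        rw [hc1, hc2]

-- ===== VERDICT (by name: the statement is the Claim_ definition above) =====
theorem count_flight_city_num_spec : Claim_equal_count_flight_city_num := by
  intro csv_list _ _
  unfold Spec_count_flight_city_num count_flight_city_num count_flight_city_num_alt
  simp only [pvStepA_eq]
  rw [← List.foldl_map (f := fun row => PySem.List.pyGetD row 1 "")
        (g := fun (d : PySem.Dict String Int) c => d.modify c 0 (· + 1)),
      ← PySem.Dict.counter_eq_foldl, PySem.Dict.items_counter]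
  rw [pvGroupGo_eq _ _ _ (Nat.le_refl _)]
  simp
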